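-- pv_equiv track=rewrite | github.com/Siddharth-Sahay/DAA | cloudy day.py | maximumPeople
-- ===== SOURCE A (Python) =====
-- def maximumPeople(p, x, y, r):
--     tp = sorted(zip(x, p))
--     cov = []
--     for i in range(len(y)):
--         cov.append((y[i] - r[i], y[i] + r[i], i))
--     cov.sort()
--     sp = 0
--     t_covered = [0] * len(x)
--     cp = [0] * len(y)
--     town_map = [[] for _ in range(len(y))]
--     i = 0
--     for town_idx, (pos, pop) in enumerate(tp):
--         while i < len(cov) and cov[i][1] < pos:
--             i += 1
--         for j in range(i, len(cov)):
--             if cov[j][0] <= pos <= cov[j][1]: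
--                 town_map[cov[j][2]].append(town_idx)
--                 cp[cov[j][2]] += pop
--                 t_covered[town_idx] += 1
--
--     for j, (pos, pop) in enumerate(tp):
--         if t_covered[j] == 0:
--             sp += pop
--
--     max_sunny_population = sp
--
--     for i in range(len(y)):
--         current_sunny_population = sp
--         for town_idx in town_map[i]:
--             if t_covered[town_idx] == 1:
--                 current_sunny_population += tp[town_idx][1]
--         max_sunny_population = max(max_sunny_population, current_sunny_population)
--
--     return max_sunny_population
-- ===== SOURCE B (Python) =====
-- def maximumPeople(p, x, y, r):
--     clouds = list(zip(y, r))
--     gains = [0] * len(clouds)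
--     sp = 0
--     for pos, pop in zip(x, p):
--         cnt = 0
--         only = 0
--         for c, (cy, cr) in enumerate(clouds):
--             if cy - cr <= pos <= cy + cr:
--                 cnt += 1
--                 only = c
--         if cnt == 0:
--             sp += pop
--         elif cnt == 1:
--             gains[only] += pop
--     best = 0
--     for g in gains:
--         if g > best:
--             best = g
--     return sp + best
-- ===== Notes on version B (the rewrite author's own statement) =====
-- stated objective: simpler
-- what changed: B drops A's two sorts, advancing pointer and per-cloud town-index lists entirely: one direct pass over the towns counts the covering clouds per town (remembering the last covering index), accumulating the sunny total and per-cloud gains, then adds the best gain.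
import Mathlib
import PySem

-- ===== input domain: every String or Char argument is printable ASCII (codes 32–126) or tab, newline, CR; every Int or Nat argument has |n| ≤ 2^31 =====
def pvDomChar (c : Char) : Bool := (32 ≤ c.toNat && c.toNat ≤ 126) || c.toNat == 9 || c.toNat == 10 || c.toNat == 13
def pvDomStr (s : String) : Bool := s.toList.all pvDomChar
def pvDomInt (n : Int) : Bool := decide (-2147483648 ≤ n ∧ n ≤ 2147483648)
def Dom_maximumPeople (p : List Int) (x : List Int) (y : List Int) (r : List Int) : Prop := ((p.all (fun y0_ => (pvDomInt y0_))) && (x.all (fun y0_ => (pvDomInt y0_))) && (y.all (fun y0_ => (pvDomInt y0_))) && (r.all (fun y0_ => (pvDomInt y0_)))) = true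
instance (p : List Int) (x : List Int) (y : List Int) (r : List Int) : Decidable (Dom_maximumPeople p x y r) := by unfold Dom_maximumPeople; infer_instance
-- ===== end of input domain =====

-- B replaces A's sort + advancing-pointer + per-cloud town-index lists by one direct pass over
-- the towns, counting covering clouds per town (objective: simpler; same asymptotic cost).

-- ===== PORT A =====
-- the 'while i < len(cov) and cov[i][1] < pos: i += 1' loop
def aAdvance (cov : List (Int × Int × Nat)) (pos : Int) (i : Nat) : Nat :=
  if h : i < cov.length then
    if (cov[i]'h).2.1 < pos then aAdvance cov pos (i + 1) else i
  else i
termination_by cov.length - i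

def aInner (cs : List (Int × Int × Nat)) (pos : Int) (pop : Int) (tIdx : Nat)
    (st : List Int × List Int × List (List Nat)) : List Int × List Int × List (List Nat) :=
  cs.foldl (fun st c =>
    if c.1 ≤ pos ∧ pos ≤ c.2.1 then
      (st.1.set tIdx (st.1.getD tIdx 0 + 1),
       st.2.1.set c.2.2 (st.2.1.getD c.2.2 0 + pop),
       st.2.2.set c.2.2 (st.2.2.getD c.2.2 [] ++ [tIdx]))
    else st) st

def aTp (x p : List Int) : List (Int × Int) :=
  PySem.List.sorted2 (x.zip p) (fun t => t.1) (fun t => t.2)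
def aCovList (y r : List Int) : List (Int × Int × Nat) :=
  (List.range y.length).map (fun i => (y.getD i 0 - r.getD i 0, y.getD i 0 + r.getD i 0, i))
def aCov (y r : List Int) : List (Int × Int × Nat) :=
  PySem.List.sorted2 (aCovList y r) (fun t => t.1) (fun t => t.2.1)

def maximumPeople (p : List Int) (x : List Int) (y : List Int) (r : List Int) : Int :=
  let tp := aTp x p
  let cov := aCov y r
  let st0 : List Int × List Int × List (List Nat) :=
    (List.replicate x.length 0, List.replicate y.length 0, List.replicate y.length [])
  let res := tp.zipIdx.foldl
    (fun (acc : Nat × (List Int × List Int × List (List Nat))) t =>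
      let i' := aAdvance cov t.1.1 acc.1
      (i', aInner (cov.drop i') t.1.1 t.1.2 t.2 acc.2)) (0, st0)
  let tc := res.2.1
  let tm := res.2.2.2
  let sp := tp.zipIdx.foldl (fun sp t => if tc.getD t.2 0 = 0 then sp + t.1.2 else sp) 0
  (List.range y.length).foldl (fun m i =>
    let cur := (tm.getD i []).foldl (fun cur tIdx =>
      if tc.getD tIdx 0 = 1 then cur + (tp.getD tIdx (0, 0)).2 else cur) sp
    max m cur) sp

-- ===== PORT B =====
-- inner loop of Source B: count the clouds covering pos, remembering the last covering index
def bCount (clouds : List (Int × Int)) (pos : Int) : Int × Nat :=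
  clouds.zipIdx.foldl (fun (acc : Int × Nat) c =>
    if c.1.1 - c.1.2 ≤ pos ∧ pos ≤ c.1.1 + c.1.2 then (acc.1 + 1, c.2) else acc) (0, 0)

def maximumPeople_alt (p : List Int) (x : List Int) (y : List Int) (r : List Int) : Int :=
  let clouds := y.zip r
  let sg := (x.zip p).foldl (fun (sg : Int × List Int) t =>
      let co := bCount clouds t.1
      if co.1 = 0 then (sg.1 + t.2, sg.2)
      else if co.1 = 1 then (sg.1, sg.2.set co.2 (sg.2.getD co.2 0 + t.2))
      else sg) (0, List.replicate clouds.length 0)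
  let best := sg.2.foldl (fun b g => if g > b then g else b) 0
  sg.1 + best

-- ===== PRECONDITION & SPEC =====
-- Pre_ excludes lists with len(r) < len(y), on which A raises IndexError while building cov (r[i]).
def Pre_maximumPeople (p : List Int) (x : List Int) (y : List Int) (r : List Int) : Prop :=
  y.length ≤ r.length
instance (p : List Int) (x : List Int) (y : List Int) (r : List Int) : Decidable (Pre_maximumPeople p x y r) := by unfold Pre_maximumPeople; infer_instance

def pvWitness_maximumPeople : List Int × List Int × List Int × List Int :=
  ([3, 5, 4], [1, 2, 3], [1], [1])

def Spec_maximumPeople (p : List Int) (x : List Int) (y : List Int) (r : List Int) (out : Int) : Prop := out = maximumPeople_alt p x y r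
instance (p : List Int) (x : List Int) (y : List Int) (r : List Int) (out : Int) : Decidable (Spec_maximumPeople p x y r out) := by unfold Spec_maximumPeople; infer_instance

-- ===== CLAIM (what is proved, stated in full; the proofs are below) =====
def Claim_equal_maximumPeople : Prop := ∀ (p : List Int) (x : List Int) (y : List Int) (r : List Int), Dom_maximumPeople p x y r → Pre_maximumPeople p x y r → Spec_maximumPeople p x y r (maximumPeople p x y r)

-- ===== LEMMAS AND PROOFS =====

lemma getD_set_self {α : Type} (l : List α) (i : Nat) (v d : α) (h : i < l.length) :
    (l.set i v).getD i d = v := by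
  rw [List.getD_eq_getElem _ _ (by simpa using h)]
  exact List.getElem_set_self _

lemma getD_set_ne {α : Type} (l : List α) (i j : Nat) (v d : α) (h : i ≠ j) :
    (l.set i v).getD j d = l.getD j d := by
  by_cases hj : j < l.length
  · rw [List.getD_eq_getElem _ _ (by simpa using hj), List.getD_eq_getElem _ _ hj]
    exact List.getElem_set_ne h _
  · rw [List.getD_eq_default, List.getD_eq_default] <;> simpa using hj

def covB (cl : Int × Int) (pos : Int) : Bool := decide (cl.1 - cl.2 ≤ pos ∧ pos ≤ cl.1 + cl.2)
def cntN (clouds : List (Int × Int)) (pos : Int) : Nat := clouds.countP (fun cl => covB cl pos)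

lemma bCount_fst (clouds : List (Int × Int)) (pos : Int) :
    (bCount clouds pos).1 = (cntN clouds pos : Int) := by
  unfold bCount
  rw [PySem.List.foldl_congr_mem _ _
    (fun (acc : Int × Nat) c => ((if c.1.1 - c.1.2 ≤ pos ∧ pos ≤ c.1.1 + c.1.2 then acc.1 + 1 else acc.1),
      (if c.1.1 - c.1.2 ≤ pos ∧ pos ≤ c.1.1 + c.1.2 then c.2 else acc.2))) _
    (by intro acc x _; beta_reduce; split_ifs <;> rfl)]
  rw [show (fun (acc : Int × Nat) (c : (Int × Int) × Nat) =>
        ((if c.1.1 - c.1.2 ≤ pos ∧ pos ≤ c.1.1 + c.1.2 then acc.1 + 1 else acc.1),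
         (if c.1.1 - c.1.2 ≤ pos ∧ pos ≤ c.1.1 + c.1.2 then c.2 else acc.2))) =
      (fun (s : Int × Nat) (e : (Int × Int) × Nat) =>
        ((fun (a : Int) (c : (Int × Int) × Nat) => if c.1.1 - c.1.2 ≤ pos ∧ pos ≤ c.1.1 + c.1.2 then a + 1 else a) s.1 e,
         (fun (o : Nat) (c : (Int × Int) × Nat) => if c.1.1 - c.1.2 ≤ pos ∧ pos ≤ c.1.1 + c.1.2 then c.2 else o) s.2 e)) from rfl]
  rw [PySem.List.foldl_prod_mk
      (f := fun (a : Int) (c : (Int × Int) × Nat) => if c.1.1 - c.1.2 ≤ pos ∧ pos ≤ c.1.1 + c.1.2 then a + 1 else a)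
      (g := fun (o : Nat) (c : (Int × Int) × Nat) => if c.1.1 - c.1.2 ≤ pos ∧ pos ≤ c.1.1 + c.1.2 then c.2 else o)]
  rw [PySem.List.foldl_ite_add_one]
  simp only [zero_add]
  congr 1
  unfold cntN
  conv_rhs => rw [← List.zipIdx_map_fst 0 clouds]
  rw [List.countP_map]
  rfl

lemma foldl_last_match {γ σ : Type} (L : List γ) (P : γ → Prop) [DecidablePred P] (f : γ → σ)
    (o0 : σ) (e : γ) (h : L.filter (fun c => decide (P c)) = [e]) :
    L.foldl (fun o c => if P c then f c else o) o0 = f e := by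
  rw [PySem.List.foldl_ite_eq_foldl_filter P (fun _ c => f c), h]
  rfl

lemma length_eq_one_exists {γ : Type} (L : List γ) (h : L.length = 1) : ∃ e, L = [e] := by
  match L, h with
  | [e], _ => exact ⟨e, rfl⟩

lemma bCount_unique (clouds : List (Int × Int)) (pos : Int) (h : cntN clouds pos = 1) :
    (bCount clouds pos).2 < clouds.length ∧
    covB (clouds.getD (bCount clouds pos).2 (0, 0)) pos = true ∧
    ∀ k, k < clouds.length → covB (clouds.getD k (0, 0)) pos = true → k = (bCount clouds pos).2 := by
  have hlen : (clouds.zipIdx.filter (fun c => decide (c.1.1 - c.1.2 ≤ pos ∧ pos ≤ c.1.1 + c.1.2))).length = 1 := by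
    rw [← List.countP_eq_length_filter]
    rw [show (fun (c : (Int × Int) × Nat) => decide (c.1.1 - c.1.2 ≤ pos ∧ pos ≤ c.1.1 + c.1.2)) =
      ((fun cl => covB cl pos) ∘ Prod.fst) from rfl]
    rw [← List.countP_map, List.zipIdx_map_fst]
    exact h
  obtain ⟨e, he⟩ := length_eq_one_exists _ hlen
  have hsnd : (bCount clouds pos).2 = e.2 := by
    unfold bCount
    rw [PySem.List.foldl_congr_mem _ _
      (fun (acc : Int × Nat) c => ((if c.1.1 - c.1.2 ≤ pos ∧ pos ≤ c.1.1 + c.1.2 then acc.1 + 1 else acc.1),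
        (if c.1.1 - c.1.2 ≤ pos ∧ pos ≤ c.1.1 + c.1.2 then c.2 else acc.2))) _
      (by intro acc x _; beta_reduce; split_ifs <;> rfl)]
    rw [show (fun (acc : Int × Nat) (c : (Int × Int) × Nat) =>
          ((if c.1.1 - c.1.2 ≤ pos ∧ pos ≤ c.1.1 + c.1.2 then acc.1 + 1 else acc.1),
           (if c.1.1 - c.1.2 ≤ pos ∧ pos ≤ c.1.1 + c.1.2 then c.2 else acc.2))) =
        (fun (s : Int × Nat) (e : (Int × Int) × Nat) =>
          ((fun (a : Int) (c : (Int × Int) × Nat) => if c.1.1 - c.1.2 ≤ pos ∧ pos ≤ c.1.1 + c.1.2 then a + 1 else a) s.1 e,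
           (fun (o : Nat) (c : (Int × Int) × Nat) => if c.1.1 - c.1.2 ≤ pos ∧ pos ≤ c.1.1 + c.1.2 then c.2 else o) s.2 e)) from rfl]
    rw [PySem.List.foldl_prod_mk
        (f := fun (a : Int) (c : (Int × Int) × Nat) => if c.1.1 - c.1.2 ≤ pos ∧ pos ≤ c.1.1 + c.1.2 then a + 1 else a)
        (g := fun (o : Nat) (c : (Int × Int) × Nat) => if c.1.1 - c.1.2 ≤ pos ∧ pos ≤ c.1.1 + c.1.2 then c.2 else o)]
    exact foldl_last_match clouds.zipIdx (fun c => c.1.1 - c.1.2 ≤ pos ∧ pos ≤ c.1.1 + c.1.2) (fun c => c.2) 0 e he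
  have hemem : e ∈ clouds.zipIdx ∧ (decide (e.1.1 - e.1.2 ≤ pos ∧ pos ≤ e.1.1 + e.1.2)) = true := by
    have : e ∈ clouds.zipIdx.filter (fun c => decide (c.1.1 - c.1.2 ≤ pos ∧ pos ≤ c.1.1 + c.1.2)) := by
      rw [he]; exact List.mem_singleton.mpr rfl
    exact ⟨List.mem_of_mem_filter this, (List.mem_filter.mp this).2⟩
  obtain ⟨e1, e2⟩ := hemem
  obtain ⟨-, hlt, hval⟩ := List.mem_zipIdx (x := e.1) (i := e.2) (by simpa using e1)
  simp only [Nat.zero_add, Nat.sub_zero] at hlt hval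
  refine ⟨hsnd ▸ hlt, ?_, ?_⟩
  · rw [hsnd, List.getD_eq_getElem _ _ hlt, ← hval]
    unfold covB
    exact e2
  · intro k hk hcov
    have : (clouds[k], k) ∈ clouds.zipIdx.filter (fun c => decide (c.1.1 - c.1.2 ≤ pos ∧ pos ≤ c.1.1 + c.1.2)) := by
      apply List.mem_filter.mpr
      constructor
      · exact List.mem_zipIdx_iff_getElem?.mpr (by simp [List.getElem?_eq_getElem hk])
      · rw [List.getD_eq_getElem _ _ hk] at hcov
        simpa [covB] using hcov
    rw [he] at this
    have := List.mem_singleton.mp this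
    rw [hsnd, ← this]

def uncovF (clouds : List (Int × Int)) (towns : List (Int × Int)) : Int :=
  ((towns.filter (fun t => cntN clouds t.1 == 0)).map (fun t => t.2)).sum
def gainF (clouds : List (Int × Int)) (towns : List (Int × Int)) (j : Nat) : Int :=
  ((towns.filter (fun t => covB (clouds.getD j (0, 0)) t.1 && (cntN clouds t.1 == 1))).map (fun t => t.2)).sum

lemma uncovF_cons (clouds : List (Int × Int)) (t : Int × Int) (rest : List (Int × Int)) :
    uncovF clouds (t :: rest) = (if cntN clouds t.1 = 0 then t.2 else 0) + uncovF clouds rest := by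
  rw [uncovF, List.filter_cons]
  by_cases h : cntN clouds t.1 = 0
  · rw [if_pos (by simp [h]), if_pos h, List.map_cons, List.sum_cons]; rfl
  · rw [if_neg (by simp [h]), if_neg h, zero_add]; rfl

lemma gainF_cons (clouds : List (Int × Int)) (t : Int × Int) (rest : List (Int × Int)) (j : Nat) :
    gainF clouds (t :: rest) j =
      (if covB (clouds.getD j (0, 0)) t.1 = true ∧ cntN clouds t.1 = 1 then t.2 else 0) +
        gainF clouds rest j := by
  rw [gainF, List.filter_cons]
  by_cases h : covB (clouds.getD j (0, 0)) t.1 = true ∧ cntN clouds t.1 = 1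
  · rw [if_pos (by simp only [Bool.and_eq_true, beq_iff_eq]; exact ⟨h.1, h.2⟩), if_pos h, List.map_cons, List.sum_cons]; rfl
  · rw [if_neg (by simpa [Decidable.not_and_iff_not_or_not] using h), if_neg h, zero_add]; rfl

lemma b_outer (clouds : List (Int × Int)) (towns : List (Int × Int)) (sp : Int) (gains : List Int)
    (hlen : gains.length = clouds.length) :
    (towns.foldl (fun (sg : Int × List Int) t =>
      let co := bCount clouds t.1
      if co.1 = 0 then (sg.1 + t.2, sg.2)
      else if co.1 = 1 then (sg.1, sg.2.set co.2 (sg.2.getD co.2 0 + t.2))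
      else sg) (sp, gains)).1 = sp + uncovF clouds towns ∧
    (towns.foldl (fun (sg : Int × List Int) t =>
      let co := bCount clouds t.1
      if co.1 = 0 then (sg.1 + t.2, sg.2)
      else if co.1 = 1 then (sg.1, sg.2.set co.2 (sg.2.getD co.2 0 + t.2))
      else sg) (sp, gains)).2.length = clouds.length ∧
    ∀ j, j < clouds.length →
      (towns.foldl (fun (sg : Int × List Int) t =>
        let co := bCount clouds t.1
        if co.1 = 0 then (sg.1 + t.2, sg.2)
        else if co.1 = 1 then (sg.1, sg.2.set co.2 (sg.2.getD co.2 0 + t.2))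
        else sg) (sp, gains)).2.getD j 0 = gains.getD j 0 + gainF clouds towns j := by
  induction towns generalizing sp gains with
  | nil => simp [uncovF, gainF, hlen]
  | cons t rest ih =>
    simp only [List.foldl_cons]
    have hfst := bCount_fst clouds t.1
    by_cases h0 : cntN clouds t.1 = 0
    · have hco : (bCount clouds t.1).1 = 0 := by rw [hfst, h0]; rfl
      rw [hco, if_pos rfl]
      obtain ⟨ih1, ih2, ih3⟩ := ih (sp + t.2) gains hlen
      refine ⟨?_, ih2, ?_⟩
      · rw [ih1, uncovF_cons, if_pos h0]; ring
      · intro j hj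
        rw [ih3 j hj, gainF_cons, if_neg (fun hc => by rw [hc.2] at h0; exact one_ne_zero h0), zero_add]
    · by_cases h1 : cntN clouds t.1 = 1
      · have hco : (bCount clouds t.1).1 = 1 := by rw [hfst, h1]; rfl
        obtain ⟨hjr, hjrcov, hjruniq⟩ := bCount_unique clouds t.1 h1
        set jr := (bCount clouds t.1).2 with hjrdef
        rw [hco, if_neg (by decide : ¬ ((1:Int) = 0)), if_pos rfl]
        have hlen' : (gains.set jr (gains.getD jr 0 + t.2)).length = clouds.length := by
          rw [List.length_set]; exact hlen
        obtain ⟨ih1, ih2, ih3⟩ := ih sp (gains.set jr (gains.getD jr 0 + t.2)) hlen'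
        refine ⟨?_, ih2, ?_⟩
        · rw [ih1, uncovF_cons, if_neg h0, zero_add]
        · intro j hj
          rw [ih3 j hj, gainF_cons]
          by_cases hcj : covB (clouds.getD j (0, 0)) t.1 = true
          · have hjeq : j = jr := hjruniq j hj hcj
            rw [if_pos ⟨hcj, h1⟩, hjeq, getD_set_self _ _ _ _ (by rw [hlen]; exact hjr)]
            ring
          · have hjne : jr ≠ j := by
              intro heq; exact hcj (heq ▸ hjrcov)
            rw [if_neg (fun hc => hcj hc.1), getD_set_ne _ _ _ _ _ hjne, zero_add]
      · have hco : ¬ (bCount clouds t.1).1 = 0 := by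
          rw [hfst]; exact_mod_cast h0
        have hco1 : ¬ (bCount clouds t.1).1 = 1 := by
          rw [hfst]; exact_mod_cast h1
        rw [if_neg hco, if_neg hco1]
        obtain ⟨ih1, ih2, ih3⟩ := ih sp gains hlen
        refine ⟨?_, ih2, ?_⟩
        · rw [ih1, uncovF_cons, if_neg h0, zero_add]
        · intro j hj
          rw [ih3 j hj, gainF_cons, if_neg (fun hc => h1 hc.2), zero_add]

lemma aAdvance_inv (cov : List (Int × Int × Nat)) (pos : Int) (i : Nat)
    (hpre : ∀ k (hk : k < cov.length), k < i → (cov[k]'hk).2.1 < pos) :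
    ∀ k (hk : k < cov.length), k < aAdvance cov pos i → (cov[k]'hk).2.1 < pos := by
  fun_induction aAdvance with
  | case1 i h hlt ih =>
    exact ih (fun k hk hki => by
      rcases Nat.lt_succ_iff_lt_or_eq.mp hki with h' | h'
      · exact hpre k hk h'
      · subst h'; exact hlt)
  | case2 i h hlt => exact fun k hk hki => hpre k hk hki
  | case3 i h => exact fun k hk hki => hpre k hk hki

lemma filter_drop_of_prefix_fails {α : Type} (l : List α) (i : Nat) (q : α → Bool)
    (h : ∀ k (hk : k < l.length), k < i → q (l[k]'hk) = false) :
    (l.drop i).filter q = l.filter q := by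
  conv_rhs => rw [← List.take_append_drop i l]
  rw [List.filter_append]
  have : (l.take i).filter q = [] := by
    rw [List.filter_eq_nil_iff]
    intro a ha
    obtain ⟨j, hj, hval⟩ := List.mem_take_iff_getElem.mp ha
    have := h j (lt_of_lt_of_le hj (by omega)) (by omega)
    simp [← hval, this]
  rw [this, List.nil_append]

lemma foldl_triple_split {β σ1 σ2 σ3 : Type} (f1 : σ1 → β → σ1) (f2 : σ2 → β → σ2)
    (f3 : σ3 → β → σ3) (l : List β) (a : σ1) (b : σ2) (c : σ3) :
    l.foldl (fun s e => (f1 s.1 e, f2 s.2.1 e, f3 s.2.2 e)) (a, b, c) =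
      (l.foldl f1 a, l.foldl f2 b, l.foldl f3 c) := by
  induction l generalizing a b c with
  | nil => rfl
  | cons e t ih => simpa using ih (f1 a e) (f2 b e) (f3 c e)

-- the three independent per-match updates
def stTc (tIdx : Nat) (tc : List Int) (_c : Int × Int × Nat) : List Int :=
  tc.set tIdx (tc.getD tIdx 0 + 1)
def stCp (pop : Int) (cp : List Int) (c : Int × Int × Nat) : List Int :=
  cp.set c.2.2 (cp.getD c.2.2 0 + pop)
def stTm (tIdx : Nat) (tm : List (List Nat)) (c : Int × Int × Nat) : List (List Nat) :=
  tm.set c.2.2 (tm.getD c.2.2 [] ++ [tIdx])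

lemma aInner_split (cs : List (Int × Int × Nat)) (pos pop : Int) (tIdx : Nat)
    (tc cp : List Int) (tm : List (List Nat)) :
    aInner cs pos pop tIdx (tc, cp, tm) =
      ((cs.filter (fun c => decide (c.1 ≤ pos ∧ pos ≤ c.2.1))).foldl (stTc tIdx) tc,
       (cs.filter (fun c => decide (c.1 ≤ pos ∧ pos ≤ c.2.1))).foldl (stCp pop) cp,
       (cs.filter (fun c => decide (c.1 ≤ pos ∧ pos ≤ c.2.1))).foldl (stTm tIdx) tm) := by
  unfold aInner
  rw [PySem.List.foldl_ite_eq_foldl_filter (fun (c : Int × Int × Nat) => c.1 ≤ pos ∧ pos ≤ c.2.1)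
    (fun st c =>
      ((st.1.set tIdx (st.1.getD tIdx 0 + 1) : List Int),
       (st.2.1.set c.2.2 (st.2.1.getD c.2.2 0 + pop) : List Int),
       (st.2.2.set c.2.2 (st.2.2.getD c.2.2 [] ++ [tIdx]) : List (List Nat))))]
  exact foldl_triple_split (stTc tIdx) (stCp pop) (stTm tIdx) _ tc cp tm

lemma stTc_fold_length (ms : List (Int × Int × Nat)) (tIdx : Nat) (tc : List Int) :
    (ms.foldl (stTc tIdx) tc).length = tc.length := by
  induction ms generalizing tc with
  | nil => rfl
  | cons c t ih => rw [List.foldl_cons, ih, stTc, List.length_set]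

lemma stTc_fold_getD_self (ms : List (Int × Int × Nat)) (tIdx : Nat) (tc : List Int)
    (h : tIdx < tc.length) :
    (ms.foldl (stTc tIdx) tc).getD tIdx 0 = tc.getD tIdx 0 + ms.length := by
  induction ms generalizing tc with
  | nil => simp
  | cons c t ih =>
    rw [List.foldl_cons, ih _ (by rw [stTc, List.length_set]; exact h)]
    rw [stTc, getD_set_self _ _ _ _ h, List.length_cons]
    push_cast; ring

lemma stTc_fold_getD_other (ms : List (Int × Int × Nat)) (tIdx j : Nat) (tc : List Int)
    (h : tIdx ≠ j) :
    (ms.foldl (stTc tIdx) tc).getD j 0 = tc.getD j 0 := by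
  induction ms generalizing tc with
  | nil => rfl
  | cons c t ih => rw [List.foldl_cons, ih, stTc, getD_set_ne _ _ _ _ _ h]

lemma stTm_fold_length (ms : List (Int × Int × Nat)) (tIdx : Nat) (tm : List (List Nat)) :
    (ms.foldl (stTm tIdx) tm).length = tm.length := by
  induction ms generalizing tm with
  | nil => rfl
  | cons c t ih => rw [List.foldl_cons, ih, stTm, List.length_set]

lemma stTm_fold_getD_of_no_match (ms : List (Int × Int × Nat)) (tIdx j : Nat)
    (tm : List (List Nat)) (h : ∀ c ∈ ms, c.2.2 ≠ j) :
    (ms.foldl (stTm tIdx) tm).getD j [] = tm.getD j [] := by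
  induction ms generalizing tm with
  | nil => rfl
  | cons c t ih =>
    rw [List.foldl_cons, ih _ (fun c hc => h c (List.mem_cons_of_mem _ hc)), stTm,
      getD_set_ne _ _ _ _ _ (h c (List.mem_cons_self))]

lemma stTm_fold_getD (ms : List (Int × Int × Nat)) (tIdx j : Nat) (tm : List (List Nat))
    (hnd : (ms.map (fun c => c.2.2)).Nodup) (hj : j < tm.length) :
    (ms.foldl (stTm tIdx) tm).getD j [] =
      tm.getD j [] ++ (if ms.any (fun c => c.2.2 == j) then [tIdx] else []) := by
  induction ms generalizing tm with
  | nil => simp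
  | cons c t ih =>
    rw [List.map_cons, List.nodup_cons] at hnd
    rw [List.foldl_cons]
    by_cases hc : c.2.2 = j
    · have hnom : ∀ c' ∈ t, c'.2.2 ≠ j := by
        intro c' hc' heq
        exact hnd.1 (List.mem_map.mpr ⟨c', hc', heq.trans hc.symm⟩)
      rw [stTm_fold_getD_of_no_match _ _ _ _ hnom, stTm, hc,
        getD_set_self _ _ _ _ hj, List.any_cons]
      simp [hc]
    · rw [ih _ hnd.2 (by rw [stTm, List.length_set]; exact hj), stTm,
        getD_set_ne _ _ _ _ _ hc, List.any_cons]
      have : (c.2.2 == j) = false := by simpa using hc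
      rw [this, Bool.false_or]

def qP (pos : Int) : (Int × Int × Nat) → Bool := fun c => decide (c.1 ≤ pos ∧ pos ≤ c.2.1)

def tcStep (cov : List (Int × Int × Nat)) (tc : List Int) (t : (Int × Int) × Nat) : List Int :=
  (cov.filter (qP t.1.1)).foldl (stTc t.2) tc
def cpStep (cov : List (Int × Int × Nat)) (cp : List Int) (t : (Int × Int) × Nat) : List Int :=
  (cov.filter (qP t.1.1)).foldl (stCp t.1.2) cp
def tmStep (cov : List (Int × Int × Nat)) (tm : List (List Nat)) (t : (Int × Int) × Nat) : List (List Nat) :=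
  (cov.filter (qP t.1.1)).foldl (stTm t.2) tm

lemma loop_elim (cov : List (Int × Int × Nat)) (L : List ((Int × Int) × Nat)) (i : Nat)
    (st : List Int × List Int × List (List Nat))
    (hsort : L.Pairwise (fun a b => a.1.1 ≤ b.1.1))
    (hinv : ∀ t ∈ L, ∀ k (hk : k < cov.length), k < i → (cov[k]'hk).2.1 < t.1.1) :
    (L.foldl (fun (acc : Nat × (List Int × List Int × List (List Nat))) t =>
        let i' := aAdvance cov t.1.1 acc.1
        (i', aInner (cov.drop i') t.1.1 t.1.2 t.2 acc.2)) (i, st)).2 =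
      L.foldl (fun st t => aInner cov t.1.1 t.1.2 t.2 st) st := by
  induction L generalizing i st with
  | nil => rfl
  | cons t rest ih =>
    rw [List.foldl_cons, List.foldl_cons]
    have hadv : ∀ k (hk : k < cov.length), k < aAdvance cov t.1.1 i → (cov[k]'hk).2.1 < t.1.1 :=
      aAdvance_inv cov t.1.1 i (fun k hk hki => hinv t List.mem_cons_self k hk hki)
    have hhead : aInner (cov.drop (aAdvance cov t.1.1 i)) t.1.1 t.1.2 t.2 st =
        aInner cov t.1.1 t.1.2 t.2 st := by
      obtain ⟨tc, cp, tm⟩ := st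
      rw [aInner_split, aInner_split,
        filter_drop_of_prefix_fails cov (aAdvance cov t.1.1 i) _
          (fun k hk hki => by
            have := hadv k hk hki
            simp only [decide_eq_false_iff_not]
            intro hc
            omega)]
    simp only []
    rw [hhead]
    exact ih (aAdvance cov t.1.1 i) _ (List.Pairwise.of_cons hsort)
      (fun t' ht' k hk hki => lt_of_lt_of_le (hadv k hk hki)
        (List.rel_of_pairwise_cons hsort ht'))

lemma ideal_split (cov : List (Int × Int × Nat)) (L : List ((Int × Int) × Nat))
    (a b : List Int) (c : List (List Nat)) :
    L.foldl (fun st t => aInner cov t.1.1 t.1.2 t.2 st) (a, b, c) =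
      (L.foldl (tcStep cov) a, L.foldl (cpStep cov) b, L.foldl (tmStep cov) c) := by
  induction L generalizing a b c with
  | nil => rfl
  | cons t rest ih =>
    rw [List.foldl_cons, List.foldl_cons, List.foldl_cons, List.foldl_cons, aInner_split]
    exact ih _ _ _

lemma tcStep_fold_getD_other (cov : List (Int × Int × Nat)) (L : List ((Int × Int) × Nat))
    (j : Nat) (tc : List Int) (hj : ∀ t ∈ L, t.2 ≠ j) :
    (L.foldl (tcStep cov) tc).getD j 0 = tc.getD j 0 := by
  induction L generalizing tc with
  | nil => rfl
  | cons t rest ih =>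
    rw [List.foldl_cons, ih _ (fun t' ht' => hj t' (List.mem_cons_of_mem _ ht')), tcStep]
    exact stTc_fold_getD_other _ _ _ _ (hj t List.mem_cons_self)

lemma tcStep_fold_getD (cov : List (Int × Int × Nat)) (L : List ((Int × Int) × Nat))
    (tc : List Int) (hnd : (L.map (fun t => t.2)).Nodup) (hlt : ∀ t ∈ L, t.2 < tc.length) :
    ∀ t ∈ L, (L.foldl (tcStep cov) tc).getD t.2 0 =
      tc.getD t.2 0 + ((cov.filter (qP t.1.1)).length : Int) := by
  induction L generalizing tc with
  | nil => intro t ht; cases ht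
  | cons t0 rest ih =>
    intro t ht
    rw [List.map_cons, List.nodup_cons] at hnd
    rw [List.foldl_cons]
    rcases List.mem_cons.mp ht with h | h
    · subst h
      rw [tcStep_fold_getD_other _ _ _ _
        (fun t' ht' heq => hnd.1 (List.mem_map.mpr ⟨t', ht', heq⟩)), tcStep]
      exact stTc_fold_getD_self _ _ _ (hlt t List.mem_cons_self)
    · rw [ih _ hnd.2 (fun t' ht' => by
          rw [tcStep, stTc_fold_length]; exact hlt t' (List.mem_cons_of_mem _ ht')) t h]
      congr 1
      rw [tcStep]
      apply stTc_fold_getD_other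
      intro heq
      exact hnd.1 (List.mem_map.mpr ⟨t, h, heq.symm⟩)

lemma tmStep_fold_getD (cov : List (Int × Int × Nat)) (L : List ((Int × Int) × Nat))
    (j : Nat) (tm : List (List Nat)) (hndcov : (cov.map (fun c => c.2.2)).Nodup)
    (hj : j < tm.length) :
    (L.foldl (tmStep cov) tm).getD j [] =
      tm.getD j [] ++
        (L.filter (fun t => (cov.filter (qP t.1.1)).any (fun c => c.2.2 == j))).map (fun t => t.2) := by
  induction L generalizing tm with
  | nil => simp
  | cons t rest ih =>
    rw [List.foldl_cons, ih _ (by rw [tmStep, stTm_fold_length]; exact hj), tmStep,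
      stTm_fold_getD _ _ _ _
        (List.Sublist.nodup (List.Sublist.map (fun (c : Int × Int × Nat) => c.2.2)
          (List.filter_sublist (p := qP t.1.1) (l := cov))) hndcov)
        hj,
      List.filter_cons]
    by_cases hmatch : (cov.filter (qP t.1.1)).any (fun c => c.2.2 == j) = true
    · rw [if_pos hmatch, hmatch, if_pos rfl, List.map_cons, List.append_assoc]
      rfl
    · rw [if_neg hmatch]
      rw [Bool.not_eq_true] at hmatch
      rw [hmatch]
      simp

lemma sorted2_eq_sorted_toLex {α : Type} (xs : List α) (k1 k2 : α → Int) :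
    PySem.List.sorted2 xs k1 k2 = PySem.List.sorted xs (fun x => toLex (k1 x, k2 x)) := by
  rw [PySem.List.sorted_eq_foldl_insertBy]
  unfold PySem.List.sorted2
  simp only [if_neg (by decide : ¬ (false = true))]
  congr 1
  funext acc x
  congr 1
  funext a b
  rw [Bool.eq_iff_iff]
  simp only [Prod.Lex.lt_iff, ofLex_toLex, Bool.or_eq_true, Bool.and_eq_true,
    Bool.not_eq_true', decide_eq_true_eq, decide_eq_false_iff_not]
  omega

lemma aTp_perm (x p : List Int) : (aTp x p).Perm (x.zip p) :=
  PySem.List.sorted2_perm _ _ _ _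

lemma aTp_pairwise (x p : List Int) : (aTp x p).Pairwise (fun a b => a.1 ≤ b.1) := by
  have h := PySem.List.sorted_pairwise (x.zip p) (fun t => toLex (t.1, t.2))
  rw [aTp, sorted2_eq_sorted_toLex]
  exact h.imp (fun hab => by
    rcases Prod.Lex.le_iff.mp hab with h' | ⟨h', -⟩
    · exact le_of_lt h'
    · exact le_of_eq h')

lemma aCov_perm (y r : List Int) : (aCov y r).Perm (aCovList y r) :=
  PySem.List.sorted2_perm _ _ _ _

lemma aCovList_map_idx (y r : List Int) :
    (aCovList y r).map (fun c => c.2.2) = List.range y.length := by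
  rw [aCovList, List.map_map]
  exact List.map_id _

lemma aCov_nodup_idx (y r : List Int) : ((aCov y r).map (fun c => c.2.2)).Nodup := by
  have hperm := (aCov_perm y r).map (fun c => c.2.2)
  rw [aCovList_map_idx] at hperm
  exact hperm.nodup_iff.mpr List.nodup_range

lemma self_eq_map_range_getD {α : Type} (l : List α) (d : α) :
    l = (List.range l.length).map (fun j => l.getD j d) := by
  apply List.ext_getElem (by simp)
  intro i h1 h2
  simp only [List.getElem_map, List.getElem_range]
  rw [List.getD_eq_getElem _ _ h1]

lemma countP_getD_range {α : Type} (l : List α) (q : α → Bool) (d : α) :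
    (List.range l.length).countP (fun j => q (l.getD j d)) = l.countP q := by
  conv_rhs => rw [self_eq_map_range_getD l d]
  rw [List.countP_map]
  rfl

lemma zip_getD (y r : List Int) (j : Nat) (hj : j < (y.zip r).length) :
    (y.zip r).getD j (0, 0) = (y.getD j 0, r.getD j 0) := by
  rw [List.getD_eq_getElem _ _ hj, List.getElem_zip]
  rw [List.length_zip] at hj
  rw [List.getD_eq_getElem _ _ (by omega), List.getD_eq_getElem _ _ (by omega)]

lemma cov_filter_length (y r : List Int) (hpre : y.length ≤ r.length) (pos : Int) :
    ((aCov y r).filter (qP pos)).length = cntN (y.zip r) pos := by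
  have hlen : (y.zip r).length = y.length := by rw [List.length_zip]; omega
  rw [((aCov_perm y r).filter (qP pos)).length_eq, aCovList, List.filter_map,
    List.length_map, ← List.countP_eq_length_filter, cntN, ← countP_getD_range (y.zip r) _ (0, 0), hlen]
  apply List.countP_congr
  intro j hj
  rw [List.mem_range] at hj
  rw [zip_getD y r j (by omega)]
  rfl

lemma cov_any_idx (y r : List Int) (hpre : y.length ≤ r.length) (pos : Int) (j : Nat)
    (hj : j < y.length) :
    ((aCov y r).filter (qP pos)).any (fun c => c.2.2 == j) =
      covB ((y.zip r).getD j (0, 0)) pos := by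
  rw [Bool.eq_iff_iff, List.any_eq_true]
  constructor
  · rintro ⟨c, hc, hcj⟩
    rw [List.mem_filter] at hc
    have hmem := (aCov_perm y r).mem_iff.mp hc.1
    rw [aCovList, List.mem_map] at hmem
    obtain ⟨i, hi, hval⟩ := hmem
    rw [List.mem_range] at hi
    have : i = j := by
      have := hcj
      rw [← hval] at this
      simpa using this
    subst this
    rw [zip_getD y r i (by rw [List.length_zip]; omega), covB]
    have := hc.2
    rw [← hval] at this
    simpa [qP] using this
  · intro hcov
    refine ⟨(y.getD j 0 - r.getD j 0, y.getD j 0 + r.getD j 0, j), ?_, by simp⟩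
    rw [List.mem_filter]
    constructor
    · apply (aCov_perm y r).mem_iff.mpr
      rw [aCovList, List.mem_map]
      exact ⟨j, List.mem_range.mpr hj, rfl⟩
    · rw [zip_getD y r j (by rw [List.length_zip]; omega), covB] at hcov
      simpa [qP] using hcov

lemma zipIdx_nodup {α : Type} (l : List α) : (l.zipIdx.map (fun t => t.2)).Nodup := by
  rw [show (fun (t : α × Nat) => t.2) = Prod.snd from rfl, List.zipIdx_map_snd]
  exact List.nodup_range'

lemma mem_zipIdx_getD {α : Type} (l : List α) (t : α × Nat) (d : α) (ht : t ∈ l.zipIdx) :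
    t.2 < l.length ∧ l.getD t.2 d = t.1 := by
  obtain ⟨-, h2, h3⟩ := List.mem_zipIdx (x := t.1) (i := t.2) (by simpa using ht)
  simp only [Nat.zero_add, Nat.sub_zero] at h2 h3
  exact ⟨h2, by rw [List.getD_eq_getElem _ _ h2, h3]⟩

lemma zipIdx_pairwise_fst {α : Type} (l : List α) (R : α → α → Prop) (h : l.Pairwise R) :
    l.zipIdx.Pairwise (fun a b => R a.1 b.1) := by
  have : l.zipIdx.map Prod.fst = l := List.zipIdx_map_fst 0 l
  rw [← List.pairwise_map (f := (Prod.fst : α × Nat → α))]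
  rw [this]
  exact h

lemma zipIdx_filter_map' {α : Type} (l : List α) (n : Nat) (pr : α → Bool) (f : α → Int) :
    ((l.zipIdx n).filter (fun t => pr t.1)).map (fun t => f t.1) = (l.filter pr).map f := by
  induction l generalizing n with
  | nil => rfl
  | cons a t ih =>
    rw [List.zipIdx_cons, List.filter_cons, List.filter_cons]
    by_cases h : pr a = true
    · rw [if_pos h, if_pos h, List.map_cons, List.map_cons, ih]
    · rw [if_neg h, if_neg h, ih]

lemma zipIdx_filter_map {α : Type} (l : List α) (pr : α → Bool) (f : α → Int) :
    (l.zipIdx.filter (fun t => pr t.1)).map (fun t => f t.1) = (l.filter pr).map f :=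
  zipIdx_filter_map' l 0 pr f

lemma filter_map_sum_perm {α : Type} (l1 l2 : List α) (h : l1.Perm l2) (pr : α → Bool)
    (f : α → Int) : ((l1.filter pr).map f).sum = ((l2.filter pr).map f).sum :=
  ((h.filter pr).map f).sum_eq

lemma foldl_max_shift {β : Type} (L : List β) (sp : Int) (g : β → Int) (b : Int) :
    L.foldl (fun m i => max m (sp + g i)) (sp + b) = sp + (L.map g).foldl max b := by
  induction L generalizing b with
  | nil => rfl
  | cons e t ih =>
    have h : max (sp + b) (sp + g e) = sp + max b (g e) := max_add_add_left sp b (g e)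
    simp only [List.foldl_cons, List.map_cons, h]
    exact ih (max b (g e))

lemma getD_replicate_lt {α : Type} (n m : Nat) (a d : α) (h : m < n) :
    (List.replicate n a).getD m d = a := by
  rw [List.getD_eq_getElem _ _ (by simpa using h)]
  exact List.getElem_replicate _

lemma A_char (p x y r : List Int) (hpre : y.length ≤ r.length) :
    maximumPeople p x y r =
      uncovF (y.zip r) (x.zip p) +
        (((List.range (y.zip r).length).map (gainF (y.zip r) (x.zip p))).foldl max 0) := by
  have hzl : (y.zip r).length = y.length := by rw [List.length_zip]; omega
  have htplen : (aTp x p).length = (x.zip p).length := (aTp_perm x p).length_eq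
  have hxlen : (aTp x p).length ≤ x.length := by
    rw [htplen, List.length_zip]; omega
  -- town list with indices
  have hTnd : ((aTp x p).zipIdx.map (fun t => t.2)).Nodup := zipIdx_nodup _
  have hTlt : ∀ t ∈ (aTp x p).zipIdx, t.2 < (List.replicate x.length (0 : Int)).length := by
    intro t ht
    rw [List.length_replicate]
    exact lt_of_lt_of_le (mem_zipIdx_getD _ t (0, 0) ht).1 hxlen
  unfold maximumPeople
  simp only []
  rw [loop_elim (aCov y r) (aTp x p).zipIdx 0 _
    (zipIdx_pairwise_fst _ _ (aTp_pairwise x p))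
    (fun t ht k hk hki => absurd hki (Nat.not_lt_zero k)),
    ideal_split]
  simp only []
  -- characterize t_covered
  have htcval : ∀ t ∈ (aTp x p).zipIdx,
      ((aTp x p).zipIdx.foldl (tcStep (aCov y r)) (List.replicate x.length 0)).getD t.2 0 =
        (cntN (y.zip r) t.1.1 : Int) := by
    intro t ht
    rw [tcStep_fold_getD _ _ _ hTnd hTlt t ht,
      getD_replicate_lt _ _ _ _ (by simpa using hTlt t ht), cov_filter_length y r hpre, zero_add]
  -- sp
  have hsp : (aTp x p).zipIdx.foldl (fun sp t =>
      if ((aTp x p).zipIdx.foldl (tcStep (aCov y r)) (List.replicate x.length 0)).getD t.2 0 = 0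
      then sp + t.1.2 else sp) 0 = uncovF (y.zip r) (x.zip p) := by
    rw [PySem.List.foldl_congr_mem _ _
      (fun sp t => if cntN (y.zip r) t.1.1 = 0 then sp + t.1.2 else sp) _
      (by
        intro acc t ht
        rw [htcval t ht]
        beta_reduce
        by_cases h : cntN (y.zip r) t.1.1 = 0
        · rw [if_pos (by exact_mod_cast h), if_pos h]
        · rw [if_neg (by exact_mod_cast h), if_neg h]),
      PySem.List.foldl_ite_eq_foldl_filter
        (fun (t : (Int × Int) × Nat) => cntN (y.zip r) t.1.1 = 0)
        (fun (sp : Int) (t : (Int × Int) × Nat) => sp + t.1.2),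
      PySem.List.foldl_add _ (fun (t : (Int × Int) × Nat) => t.1.2) 0, zero_add,
      zipIdx_filter_map (aTp x p) (fun e => decide (cntN (y.zip r) e.1 = 0)) (fun e => e.2),
      List.filter_congr (l := aTp x p) (q := fun t => cntN (y.zip r) t.1 == 0)
        (by intro t ht; exact Eq.symm (Bool.beq_eq_decide_eq _ 0)),
      filter_map_sum_perm (aTp x p) (x.zip p) (aTp_perm x p) _ _, uncovF]
  rw [hsp]
  -- per-cloud gain
  have hcur : ∀ j, j < y.length →
      ((((aTp x p).zipIdx.foldl (tmStep (aCov y r)) (List.replicate y.length [])).getD j []).foldl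
        (fun cur tIdx =>
          if ((aTp x p).zipIdx.foldl (tcStep (aCov y r)) (List.replicate x.length 0)).getD tIdx 0 = 1
          then cur + ((aTp x p).getD tIdx (0, 0)).2 else cur)
        (uncovF (y.zip r) (x.zip p))) =
      uncovF (y.zip r) (x.zip p) + gainF (y.zip r) (x.zip p) j := by
    intro j hj
    rw [tmStep_fold_getD _ _ _ _ (aCov_nodup_idx y r) (by rw [List.length_replicate]; exact hj),
      getD_replicate_lt _ _ _ _ hj, List.nil_append, List.foldl_map]
    rw [PySem.List.foldl_congr_mem _ _
      (fun cur t => if cntN (y.zip r) t.1.1 = 1 then cur + t.1.2 else cur) _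
      (by
        intro acc t ht
        have htT := List.mem_of_mem_filter ht
        rw [htcval t htT, (mem_zipIdx_getD (aTp x p) t (0, 0) htT).2]
        beta_reduce
        by_cases h : cntN (y.zip r) t.1.1 = 1
        · rw [if_pos (by exact_mod_cast h), if_pos h]
        · rw [if_neg (by exact_mod_cast h), if_neg h]),
      PySem.List.foldl_ite_eq_foldl_filter
        (fun (t : (Int × Int) × Nat) => cntN (y.zip r) t.1.1 = 1)
        (fun (cur : Int) (t : (Int × Int) × Nat) => cur + t.1.2),
      List.filter_filter,
      PySem.List.foldl_add _ (fun (t : (Int × Int) × Nat) => t.1.2) _]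
    congr 1
    rw [List.filter_congr (l := (aTp x p).zipIdx)
      (q := fun t => covB ((y.zip r).getD j (0, 0)) t.1.1 && (cntN (y.zip r) t.1.1 == 1))
      (by
        intro t ht
        rw [cov_any_idx y r hpre t.1.1 j hj, Bool.and_comm]
        beta_reduce
        congr 1),
      zipIdx_filter_map (aTp x p)
        (fun e => covB ((y.zip r).getD j (0, 0)) e.1 && (cntN (y.zip r) e.1 == 1)) (fun e => e.2),
      filter_map_sum_perm (aTp x p) (x.zip p) (aTp_perm x p) _ _, gainF]
  rw [PySem.List.foldl_congr_mem _ _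
    (fun m i => max m (uncovF (y.zip r) (x.zip p) + gainF (y.zip r) (x.zip p) i)) _
    (by
      intro acc i hi
      rw [hcur i (List.mem_range.mp hi)])]
  have hshift := foldl_max_shift (List.range y.length) (uncovF (y.zip r) (x.zip p))
    (gainF (y.zip r) (x.zip p)) 0
  rw [add_zero] at hshift
  rw [hshift, hzl]

lemma B_char (p x y r : List Int) :
    maximumPeople_alt p x y r =
      uncovF (y.zip r) (x.zip p) +
        (((List.range (y.zip r).length).map (gainF (y.zip r) (x.zip p))).foldl max 0) := by
  unfold maximumPeople_alt
  obtain ⟨h1, h2, h3⟩ := b_outer (y.zip r) (x.zip p) 0 (List.replicate (y.zip r).length 0)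
    (by rw [List.length_replicate])
  simp only []
  rw [h1, zero_add]
  congr 1
  have hgl : (((x.zip p).foldl (fun (sg : Int × List Int) t =>
      let co := bCount (y.zip r) t.1
      if co.1 = 0 then (sg.1 + t.2, sg.2)
      else if co.1 = 1 then (sg.1, sg.2.set co.2 (sg.2.getD co.2 0 + t.2))
      else sg) (0, List.replicate (y.zip r).length 0)).2) =
      (List.range (y.zip r).length).map (gainF (y.zip r) (x.zip p)) := by
    apply List.ext_getElem
    · rw [h2, List.length_map, List.length_range]
    · intro i hi1 hi2
      have hiM : i < (y.zip r).length := by rw [h2] at hi1; exact hi1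
      rw [← List.getD_eq_getElem _ 0 hi1, h3 i hiM]
      simp only [List.getElem_map, List.getElem_range]
      rw [List.getD_replicate, zero_add]
      exact hiM
  rw [hgl]
  apply PySem.List.foldl_congr_mem
  intro acc g _
  by_cases h : g > acc
  · rw [if_pos h, max_eq_right (le_of_lt h)]
  · rw [if_neg h, max_eq_left (by omega)]

-- ===== VERDICT (by name: the statement is the Claim_ definition above) =====
theorem maximumPeople_spec : Claim_equal_maximumPeople := by
  intro p x y r _ hpre
  unfold Spec_maximumPeople
  rw [A_char p x y r hpre, B_char]
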